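-- pv_equiv track=rewrite | github.com/zelezobeton/tictactoe | backend.py | is_winning_strike
-- ===== SOURCE A (Python) =====
-- def is_winning_strike(k, l):
--     i = 0
--     strike_char = None
--     indices_list = []
--     for char, indices in l:
--         if char is None:
--             i = 0
--             strike_char = None
--             indices_list = []
--         else:
--             if strike_char is None:
--                 strike_char = char
--                 i += 1
--                 indices_list.append(indices)
--             else:
--                 if char == strike_char:
--                     i += 1
--                     indices_list.append(indices)
--                 # When another char spoils strike, its strike must be started
--                 else:
--                     i = 1
--                     strike_char = char
--                     indices_list = [indices]
--         if i == k:
--             return strike_char, indices_list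
--     return None
-- ===== SOURCE B (Python) =====
-- def is_winning_strike(k, l):
--     # Split the line into maximal runs of consecutive equal marks, then take
--     # the first non-None run of length >= k.
--     rest = l
--     while rest:
--         char = rest[0][0]
--         run = [rest[0]]
--         rest = rest[1:]
--         while rest and rest[0][0] == char:
--             run.append(rest[0])
--             rest = rest[1:]
--         if char is not None and len(run) >= k:
--             return char, [ind for _, ind in run[:k]]
--     return None
-- ===== Notes on version B (the rewrite author's own statement) =====
-- stated objective: simpler
-- what changed: Replaces A's stateful counter/strike-char/reset scan with a two-level decomposition: peel off maximal runs of consecutive equal marks and return the first non-None run of length >= k (first k indices).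
-- outside the precondition, e.g. on is_winning_strike(0, [(None, (0, 0))]): A returns (None, []), B returns None; on is_winning_strike(0, [('x', (0, 0))]): A returns None, B returns ('x', []); on is_winning_strike(-1, [('x', (0, 0))]): A returns None, B returns ('x', [])
import Mathlib
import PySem

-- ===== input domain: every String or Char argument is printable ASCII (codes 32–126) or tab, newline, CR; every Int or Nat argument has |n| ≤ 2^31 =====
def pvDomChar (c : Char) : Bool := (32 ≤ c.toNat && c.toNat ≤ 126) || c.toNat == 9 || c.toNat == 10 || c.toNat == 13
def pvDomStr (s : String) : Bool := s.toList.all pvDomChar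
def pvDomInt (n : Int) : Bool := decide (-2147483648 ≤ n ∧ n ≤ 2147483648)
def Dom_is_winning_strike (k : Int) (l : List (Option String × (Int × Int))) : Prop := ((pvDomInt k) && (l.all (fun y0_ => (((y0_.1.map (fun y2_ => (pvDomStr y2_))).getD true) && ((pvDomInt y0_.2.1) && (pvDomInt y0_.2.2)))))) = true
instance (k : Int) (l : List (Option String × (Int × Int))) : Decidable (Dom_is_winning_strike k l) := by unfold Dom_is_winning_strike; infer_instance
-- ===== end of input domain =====

-- B replaces A's stateful counter/reset scan by a two-level run decomposition
-- (split into maximal runs of equal marks, return the first non-None run of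
-- length ≥ k); objective: simpler. Equivalence is proved on Pre_ (k ≥ 1).

-- ===== PORT A =====
-- A's loop state: (i, strike_char, indices_list); early return modelled by the
-- recursion returning the answer.
def pvALoop (k : Int) (i : Int) (sc : Option String) (il : List (Int × Int)) :
    List (Option String × (Int × Int)) → Option (String × (List (Int × Int)))
  | [] => none
  | (char, indices) :: rest =>
    let st : Int × Option String × List (Int × Int) :=
      match char with
      | none => (0, none, [])
      | some c =>
        match sc with
        | none => (i + 1, some c, il ++ [indices])
        | some s => if c == s then (i + 1, sc, il ++ [indices])
                    else (1, some c, [indices])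
    if st.1 = k then
      -- Python returns the pair (strike_char, indices_list); when strike_char is
      -- None that pair is not a value of the declared Option type — those inputs
      -- (only reachable with k = 0) are excluded by Pre_ (1 ≤ k).
      match st.2.1 with
      | some s => some (s, st.2.2)
      | none => none
    else pvALoop k st.1 st.2.1 st.2.2 rest

def is_winning_strike (k : Int) (l : List (Option String × (Int × Int))) : Option (String × (List (Int × Int))) :=
  pvALoop k 0 none [] l

-- ===== PORT B =====
-- B: peel off the maximal run starting at the head (the inner while = takeWhile/
-- dropWhile on the same predicate), test it, recurse on what is left.
def pvBScan (k : Int) : List (Option String × (Int × Int)) → Option (String × (List (Int × Int)))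
  | [] => none
  | (c, idx) :: rest =>
    let r := rest.takeWhile (fun q => q.1 == c)
    let rest' := rest.dropWhile (fun q => q.1 == c)
    match c with
    | some s =>
      if k ≤ ((1 + r.length : Int)) then
        some (s, (((c, idx) :: r).take k.toNat).map Prod.snd)
      else pvBScan k rest'
    | none => pvBScan k rest'
  termination_by l => l.length
  decreasing_by
    all_goals simp only [List.length_cons]
    all_goals exact Nat.lt_succ_of_le (List.length_dropWhile_le _ _)

def is_winning_strike_alt (k : Int) (l : List (Option String × (Int × Int))) : Option (String × (List (Int × Int))) :=
  pvBScan k l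

-- ===== PRECONDITION & SPEC =====
-- Pre_ restricts to the natural domain of strike lengths, 1 ≤ k: for k = 0 A can
-- return (None, []) — not a value of the declared Option type — and other k ≤ 0
-- are degenerate thresholds outside the function's purpose.
def Pre_is_winning_strike (k : Int) (l : List (Option String × (Int × Int))) : Prop := 1 ≤ k
instance (k : Int) (l : List (Option String × (Int × Int))) : Decidable (Pre_is_winning_strike k l) := by unfold Pre_is_winning_strike; infer_instance
def pvWitness_is_winning_strike : Int × (List (Option String × (Int × Int))) :=
  (2, [(some "x", (0, 0)), (some "x", (0, 1)), (none, (1, 0))])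

def Spec_is_winning_strike (k : Int) (l : List (Option String × (Int × Int))) (out : Option (String × (List (Int × Int)))) : Prop := out = is_winning_strike_alt k l
instance (k : Int) (l : List (Option String × (Int × Int))) (out : Option (String × (List (Int × Int)))) : Decidable (Spec_is_winning_strike k l out) := by unfold Spec_is_winning_strike; infer_instance

-- ===== CLAIM (what is proved, stated in full; the proofs are below) =====
def Claim_equal_is_winning_strike : Prop := ∀ (k : Int) (l : List (Option String × (Int × Int))), Dom_is_winning_strike k l → Pre_is_winning_strike k l → Spec_is_winning_strike k l (is_winning_strike k l)

-- ===== LEMMAS AND PROOFS =====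

-- Skipping leading None-runs: pvBScan ignores a None head element.
theorem pvBScan_none (k : Int) (idx : Int × Int) (rest : List (Option String × (Int × Int))) :
    pvBScan k ((none, idx) :: rest) = pvBScan k rest := by
  cases rest with
  | nil => simp [pvBScan]
  | cons p t =>
    obtain ⟨c, j⟩ := p
    cases c with
    | none => simp [pvBScan]
    | some s => simp [pvBScan]

-- A's loop forgets its strike state when the next element does not extend it.
theorem pvALoop_fresh (k : Int) (i : Int) (s : String) (il : List (Int × Int))
    (rest : List (Option String × (Int × Int)))
    (h : ∀ p ∈ rest.head?, p.1 ≠ some s) :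
    pvALoop k i (some s) il rest = pvALoop k 0 none [] rest := by
  cases rest with
  | nil => rfl
  | cons p t =>
    obtain ⟨c, j⟩ := p
    cases c with
    | none => simp [pvALoop]
    | some t' =>
      have hne : t' ≠ s := by
        intro hts; exact (h _ rfl) (by simp [hts])
      simp [pvALoop, hne]

-- Consuming a run of elements all equal to the current strike char.
theorem pvALoop_run (k : Int) (s : String) (run rest' : List (Option String × (Int × Int)))
    (il : List (Int × Int))
    (hall : ∀ p ∈ run, p.1 = some s) (hlt : (il.length : Int) < k) :
    pvALoop k il.length (some s) il (run ++ rest') =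
      if k ≤ (il.length : Int) + run.length then
        some (s, il ++ ((run.map Prod.snd).take (k - il.length).toNat))
      else pvALoop k (il.length + run.length) (some s) (il ++ run.map Prod.snd) rest' := by
  induction run generalizing il with
  | nil =>
    have h0 : ¬ k ≤ (il.length : Int) + (([] : List (Option String × (Int × Int))).length : Int) := by
      simp; omega
    rw [if_neg h0]
    simp
  | cons p run' ih =>
    obtain ⟨c, j⟩ := p
    have hc : c = some s := hall (c, j) (by simp)
    subst hc
    have hstep : pvALoop k il.length (some s) il (((some s, j) :: run') ++ rest') =
        if ((il.length : Int) + 1) = k then some (s, il ++ [j])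
        else pvALoop k ((il.length : Int) + 1) (some s) (il ++ [j]) (run' ++ rest') := by
      simp [pvALoop]
    rw [hstep]
    by_cases hk : ((il.length : Int) + 1) = k
    · rw [if_pos hk, if_pos (by simp; omega)]
      have h1 : (k - (il.length : Int)).toNat = 1 := by omega
      simp [h1]
    · rw [if_neg hk]
      have hih := ih (il ++ [j]) (fun p hp => hall p (by simp [hp])) (by simp; omega)
      simp only [List.length_append, List.length_cons, List.length_nil] at hih
      push_cast at hih
      rw [hih]
      simp only [List.length_cons, List.map_cons]
      push_cast
      by_cases h2 : k ≤ (il.length : Int) + ((run'.length : Int) + 1)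
      · rw [if_pos (by omega), if_pos (by omega)]
        have h3 : (k - ((il.length : Int) + 1)).toNat + 1 = (k - (il.length : Int)).toNat := by
          omega
        rw [← h3, List.take_succ_cons]
        simp
      · rw [if_neg (by omega), if_neg (by omega)]
        have h4 : (il.length : Int) + 1 + (run'.length : Int) = (il.length : Int) + ((run'.length : Int) + 1) := by ring
        rw [h4]
        simp

-- head of dropWhile does not satisfy the predicate
theorem pv_head_dropWhile {α : Type} (p : α → Bool) (l : List α)
    (x : α) (hx : x ∈ (l.dropWhile p).head?) : p x = false := by
  have := List.head?_dropWhile_not p l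
  cases h : (l.dropWhile p).head? with
  | none => simp [h] at hx
  | some y =>
    rw [h] at this hx
    simp at hx this
    subst hx; simpa using this

-- Main equivalence, by strong induction on the list length.
theorem pv_main (k : Int) (hk : 1 ≤ k) :
    ∀ (n : Nat) (l : List (Option String × (Int × Int))), l.length ≤ n →
      pvALoop k 0 none [] l = pvBScan k l := by
  intro n
  induction n with
  | zero =>
    intro l hl
    have : l = [] := List.eq_nil_of_length_eq_zero (Nat.le_zero.mp hl)
    subst this; simp [pvALoop, pvBScan]
  | succ m ih =>
    intro l hl
    cases l with
    | nil => simp [pvALoop, pvBScan]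
    | cons p rest =>
      obtain ⟨c, idx⟩ := p
      cases c with
      | none =>
        have hA : pvALoop k 0 none [] ((none, idx) :: rest) = pvALoop k 0 none [] rest := by
          have : ¬ (0 : Int) = k := by omega
          simp [pvALoop, this]
        rw [hA, pvBScan_none]
        exact ih rest (by simpa using Nat.lt_succ_iff.mp (Nat.lt_of_lt_of_le (by simp) hl))
      | some s =>
        set pr : (Option String × (Int × Int)) → Bool := (fun q => q.1 == some s) with hpr
        have hsplit : rest = rest.takeWhile pr ++ rest.dropWhile pr :=
          (List.takeWhile_append_dropWhile).symm
        have hall : ∀ p ∈ rest.takeWhile pr, p.1 = some s := by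
          intro p hp
          have := List.mem_takeWhile_imp hp
          simpa [hpr] using this
        have hhead : ∀ p ∈ (rest.dropWhile pr).head?, p.1 ≠ some s := by
          intro p hp
          have := pv_head_dropWhile pr rest p hp
          simpa [hpr] using this
        -- unfold one step of A
        have hA : pvALoop k 0 none [] ((some s, idx) :: rest) =
            if (1 : Int) = k then some (s, [idx]) else pvALoop k 1 (some s) [idx] rest := by
          simp [pvALoop]
        -- unfold one step of B
        have hB : pvBScan k ((some s, idx) :: rest) =
            if k ≤ ((1 + (rest.takeWhile pr).length : Int)) then
              some (s, (((some s, idx) :: rest.takeWhile pr).take k.toNat).map Prod.snd)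
            else pvBScan k (rest.dropWhile pr) := by
          rw [pvBScan]
        rw [hA, hB]
        by_cases hk1 : (1 : Int) = k
        · rw [if_pos hk1, if_pos (by omega)]
          have : k.toNat = 1 := by omega
          simp [this]
        · rw [if_neg hk1]
          have hrun := pvALoop_run k s (rest.takeWhile pr) (rest.dropWhile pr) [idx]
            hall (by simp; omega)
          simp only [List.length_cons, List.length_nil, Nat.cast_one,
            Nat.zero_add] at hrun
          have hL : pvALoop k 1 (some s) [idx] rest =
              if k ≤ (1 : Int) + ((rest.takeWhile pr).length : Int) then
                some (s, idx :: (((rest.takeWhile pr).map Prod.snd).take (k - 1).toNat))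
              else pvALoop k (1 + ((rest.takeWhile pr).length : Int)) (some s)
                (idx :: (rest.takeWhile pr).map Prod.snd) (rest.dropWhile pr) := by
            conv_lhs => rw [hsplit]
            convert hrun using 2
          rw [hL]
          by_cases h2 : k ≤ (1 : Int) + (rest.takeWhile pr).length
          · rw [if_pos h2, if_pos (by omega)]
            -- both take the first k elements of the run
            have hksub : (k - 1).toNat + 1 = k.toNat := by omega
            have : (((some s, idx) :: rest.takeWhile pr).take k.toNat).map Prod.snd
                = idx :: ((rest.takeWhile pr).map Prod.snd).take (k - 1).toNat := by
              rw [← hksub, List.take_succ_cons, List.map_cons, List.map_take]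
            simp [this]
          · rw [if_neg h2, if_neg (by omega)]
            rw [pvALoop_fresh k _ s _ _ hhead]
            have hlen : (rest.dropWhile pr).length ≤ m := by
              have h1 : (rest.dropWhile pr).length ≤ rest.length := List.length_dropWhile_le _ _
              simp at hl; omega
            exact ih _ hlen

-- ===== VERDICT (by name: the statement is the Claim_ definition above) =====
theorem is_winning_strike_spec : Claim_equal_is_winning_strike := by
  intro k l _ hpre
  unfold Spec_is_winning_strike is_winning_strike is_winning_strike_alt
  exact pv_main k hpre l.length l (le_refl _)
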